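-- pv_equiv track=rewrite | github.com/Elephenman/newbe | repeat-region-masker/repeat_region_masker.py | mask_sequence
-- ===== SOURCE A (Python) =====
-- def mask_sequence(seq, regions, mask_type='soft'):
--     """对序列进行mask"""
--     seq_list = list(seq)
--     for chrom, start, end, rtype in regions:
--         # BED is 0-based half-open, RepeatMasker is 1-based inclusive
--         # Convert to 0-based for Python indexing
--         s = max(0, start - 1)  # 1-based to 0-based
--         e = min(len(seq_list), end)
--         if mask_type == 'soft':
--             for i in range(s, e):
--                 seq_list[i] = seq_list[i].lower()
--         else:  # hard mask
--             for i in range(s, e):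
--                 seq_list[i] = 'N'
--     return ''.join(seq_list)
-- ===== SOURCE B (Python) =====
-- def mask_sequence(seq, regions, mask_type='soft'):
--     """对序列进行mask"""
--     result = seq
--     for chrom, start, end, rtype in regions:
--         # BED is 0-based half-open, RepeatMasker is 1-based inclusive
--         s = max(0, start - 1)
--         e = min(len(result), end)
--         if s >= e:
--             continue
--         if mask_type == 'soft':
--             result = result[:s] + result[s:e].lower() + result[e:]
--         else:  # hard mask
--             result = result[:s] + 'N' * (e - s) + result[e:]
--     return result
-- ===== Notes on version B (the rewrite author's own statement) =====
-- stated objective: simpler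
-- what changed: B keeps the sequence as an immutable string and rebuilds it per region by slice concatenation (prefix + lowered/N-filled middle + suffix), instead of converting to a char list and mutating it index by index in an inner loop.
import Mathlib
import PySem

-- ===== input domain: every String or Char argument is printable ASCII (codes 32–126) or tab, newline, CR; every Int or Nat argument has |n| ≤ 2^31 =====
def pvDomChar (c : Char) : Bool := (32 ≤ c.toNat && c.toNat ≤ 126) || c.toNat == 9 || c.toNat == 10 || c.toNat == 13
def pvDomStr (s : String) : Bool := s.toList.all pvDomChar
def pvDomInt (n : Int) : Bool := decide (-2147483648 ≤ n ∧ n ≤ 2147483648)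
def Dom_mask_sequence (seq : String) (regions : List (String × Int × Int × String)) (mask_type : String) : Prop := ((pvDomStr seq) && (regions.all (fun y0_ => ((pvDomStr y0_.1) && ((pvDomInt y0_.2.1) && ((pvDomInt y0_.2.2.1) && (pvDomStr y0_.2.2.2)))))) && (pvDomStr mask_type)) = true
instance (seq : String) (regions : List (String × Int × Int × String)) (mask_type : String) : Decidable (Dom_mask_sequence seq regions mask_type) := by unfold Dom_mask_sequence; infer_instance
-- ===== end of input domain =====

-- B rebuilds the string per region by slice concatenation (prefix ++ masked middle ++ suffix)
-- instead of mutating a char list index by index; same return value on every input.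

-- ===== PORT A =====
-- loop body of A: per region, compute s/e and mutate seq_list in the inner index loop
def maskA_region (mask_type : String) (l : List Char) (r : String × Int × Int × String) : List Char :=
  let s : Int := max 0 (r.2.1 - 1)
  let e : Int := min (l.length : Int) r.2.2.1
  if mask_type = "soft" then
    -- for i in range(s, e): seq_list[i] = seq_list[i].lower()   (i always in range: 0 ≤ s, e ≤ len)
    (PySem.List.pyRange s e 1).foldl
      (fun acc i => PySem.List.pySetD acc i (PySem.Chars.lowerChar (PySem.List.pyGetD acc i ' '))) l
  else
    -- for i in range(s, e): seq_list[i] = 'N'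
    (PySem.List.pyRange s e 1).foldl (fun acc i => PySem.List.pySetD acc i 'N') l

def mask_sequence (seq : String) (regions : List (String × Int × Int × String)) (mask_type : String) : String :=
  String.ofList (regions.foldl (maskA_region mask_type) seq.toList)

-- ===== PORT B =====
-- loop body of B: skip empty windows, else rebuild by slicing
def maskB_region (mask_type : String) (result : List Char) (r : String × Int × Int × String) : List Char :=
  let s : Int := max 0 (r.2.1 - 1)
  let e : Int := min (result.length : Int) r.2.2.1
  if s ≥ e then result
  else if mask_type = "soft" then
    PySem.List.slice result none (some s) ++ PySem.Chars.lower (PySem.List.slice result (some s) (some e))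
      ++ PySem.List.slice result (some e) none
  else
    PySem.List.slice result none (some s) ++ List.replicate (e - s).toNat 'N'
      ++ PySem.List.slice result (some e) none

def mask_sequence_alt (seq : String) (regions : List (String × Int × Int × String)) (mask_type : String) : String :=
  String.ofList (regions.foldl (maskB_region mask_type) seq.toList)

-- ===== PRECONDITION & SPEC =====
def Spec_mask_sequence (seq : String) (regions : List (String × Int × Int × String)) (mask_type : String) (out : String) : Prop := out = mask_sequence_alt seq regions mask_type
instance (seq : String) (regions : List (String × Int × Int × String)) (mask_type : String) (out : String) : Decidable (Spec_mask_sequence seq regions mask_type out) := by unfold Spec_mask_sequence; infer_instance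

-- ===== CLAIM (what is proved, stated in full; the proofs are below) =====
def Claim_equal_mask_sequence : Prop := ∀ (seq : String) (regions : List (String × Int × Int × String)) (mask_type : String), Dom_mask_sequence seq regions mask_type → Spec_mask_sequence seq regions mask_type (mask_sequence seq regions mask_type)

-- ===== LEMMAS AND PROOFS =====

-- A's inner set-loop over [n, m) equals take/map/drop surgery.
lemma setLoop_eq (f : Char → Char) (d : Char) :
    ∀ (m n : Nat) (l : List Char), n ≤ m → m ≤ l.length →
      (PySem.List.pyRange (n : Int) (m : Int) 1).foldl
        (fun acc i => PySem.List.pySetD acc i (f (PySem.List.pyGetD acc i d))) l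
      = l.take n ++ ((l.drop n).take (m - n)).map f ++ l.drop m := by
  intro m
  induction m with
  | zero =>
    intro n l hn hm
    have hn0 : n = 0 := Nat.le_zero.mp hn
    subst hn0
    simp [PySem.List.pyRange_one_eq_nil le_rfl]
  | succ k ih =>
    intro n l hn hm
    by_cases hnk : n = k + 1
    · subst hnk
      simp [PySem.List.pyRange_one_eq_nil le_rfl]
    · have hnk' : n ≤ k := by omega
      have hk : k < l.length := by omega
      have hrange : PySem.List.pyRange (n : Int) ((k + 1 : Nat) : Int) 1
          = PySem.List.pyRange (n : Int) (k : Int) 1 ++ [(k : Int)] := by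
        have h : ((k + 1 : Nat) : Int) = (k : Int) + 1 := by push_cast; ring
        rw [h, PySem.List.pyRange_one_succ_right (by exact_mod_cast hnk')]
      rw [hrange, List.foldl_append]
      rw [ih n l hnk' (by omega)]
      set A := l.take n with hA
      set B := ((l.drop n).take (k - n)).map f with hB
      have hABlen : (A ++ B).length = k := by
        simp [hA, hB]
        omega
      have hdrop : l.drop k = l[k] :: l.drop (k + 1) := List.drop_eq_getElem_cons hk
      have hP : A ++ B ++ l.drop k = (A ++ B) ++ (l[k] :: l.drop (k + 1)) := by
        rw [hdrop]
      simp only [List.foldl_cons, List.foldl_nil]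
      rw [hP]
      have hget : PySem.List.pyGetD ((A ++ B) ++ (l[k] :: l.drop (k + 1))) ((k : Nat) : Int) d
          = l[k] := by
        rw [PySem.List.pyGetD_of_nonneg _ _ (Int.natCast_nonneg k), Int.toNat_natCast]
        rw [List.getD_append_right _ _ _ _ hABlen.le]
        rw [hABlen, Nat.sub_self]
        simp [List.getD, List.getElem?_eq_getElem hk]
      have hset : PySem.List.pySetD ((A ++ B) ++ (l[k] :: l.drop (k + 1))) ((k : Nat) : Int) (f l[k])
          = (A ++ B) ++ (f l[k] :: l.drop (k + 1)) := by
        rw [PySem.List.pySetD_of_nonneg _ _ (Int.natCast_nonneg k), Int.toNat_natCast]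
        rw [List.set_append_right _ _ hABlen.le]
        rw [hABlen, Nat.sub_self, List.set_cons_zero]
      rw [hget, hset]
      have hmid : ((l.drop n).take (k + 1 - n)).map f = B ++ [f l[k]] := by
        have h1 : k + 1 - n = (k - n) + 1 := by omega
        have h2 : (l.drop n).take ((k - n) + 1) = (l.drop n).take (k - n) ++ [l[k]] := by
          rw [List.take_add_one]
          congr 1
          have h3 : (l.drop n)[k - n]? = l[k]? := by
            rw [List.getElem?_drop]
            congr 1
            omega
          rw [h3, List.getElem?_eq_getElem hk]
          rfl
        rw [h1, h2, List.map_append, hB]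
        rfl
      rw [hmid]
      simp

-- A's branch-and-inner-loop body equals B's skip-or-slice body, for explicit s, e
lemma body_eq (mask_type : String) (l : List Char) (s e : Int)
    (hs0 : 0 ≤ s) (hel : e ≤ (l.length : Int)) :
    (if mask_type = "soft" then
      (PySem.List.pyRange s e 1).foldl
        (fun acc i => PySem.List.pySetD acc i (PySem.Chars.lowerChar (PySem.List.pyGetD acc i ' '))) l
     else
      (PySem.List.pyRange s e 1).foldl (fun acc i => PySem.List.pySetD acc i 'N') l)
    = (if s ≥ e then l
       else if mask_type = "soft" then
         PySem.List.slice l none (some s) ++ PySem.Chars.lower (PySem.List.slice l (some s) (some e))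
           ++ PySem.List.slice l (some e) none
       else
         PySem.List.slice l none (some s) ++ List.replicate (e - s).toNat 'N'
           ++ PySem.List.slice l (some e) none) := by
  by_cases hse : s ≥ e
  · rw [if_pos hse, PySem.List.pyRange_one_eq_nil hse]
    split_ifs <;> rfl
  · rw [if_neg hse]
    replace hse : s < e := lt_of_not_ge hse
    have he0 : 0 ≤ e := le_of_lt (lt_of_le_of_lt hs0 hse)
    obtain ⟨n, hn⟩ : ∃ n : Nat, s = (n : Int) := ⟨s.toNat, (Int.toNat_of_nonneg hs0).symm⟩
    obtain ⟨m, hm⟩ : ∃ m : Nat, e = (m : Int) := ⟨e.toNat, (Int.toNat_of_nonneg he0).symm⟩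
    have hnm : n ≤ m := by omega
    have hml : m ≤ l.length := by rw [hm] at hel; exact_mod_cast hel
    rw [hn, hm]
    have hsl1 : PySem.List.slice l none (some ((n : Nat) : Int)) = l.take n := by
      rw [PySem.List.slice_to l (Int.natCast_nonneg n)]; simp
    have hsl2 : PySem.List.slice l (some ((n : Nat) : Int)) (some ((m : Nat) : Int))
        = (l.drop n).take (m - n) := by
      rw [PySem.List.slice_toNat l (Int.natCast_nonneg n) (Int.natCast_nonneg m)]; simp
    have hsl3 : PySem.List.slice l (some ((m : Nat) : Int)) none = l.drop m := by
      rw [PySem.List.slice_from l (Int.natCast_nonneg m)]; simp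
    by_cases hmt : mask_type = "soft"
    · rw [if_pos hmt, if_pos hmt]
      rw [setLoop_eq PySem.Chars.lowerChar ' ' m n l hnm hml]
      rw [hsl1, hsl2, hsl3]
      simp [PySem.Chars.lower]
    · rw [if_neg hmt, if_neg hmt]
      have hbody : (fun (acc : List Char) (i : Int) => PySem.List.pySetD acc i 'N')
          = (fun (acc : List Char) (i : Int) =>
              PySem.List.pySetD acc i ((fun _ => 'N') (PySem.List.pyGetD acc i ' '))) := rfl
      rw [hbody, setLoop_eq (fun _ => 'N') ' ' m n l hnm hml]
      rw [hsl1, hsl3]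
      have hlen : ((l.drop n).take (m - n)).length = m - n := by simp; omega
      have hrep : (((m : Nat) : Int) - ((n : Nat) : Int)).toNat = m - n := by omega
      rw [List.map_const', hlen, hrep]

-- per-region: A's body equals B's body, for every current list
lemma region_eq (mask_type : String) (l : List Char) (r : String × Int × Int × String) :
    maskA_region mask_type l r = maskB_region mask_type l r := by
  unfold maskA_region maskB_region
  exact body_eq mask_type l (max 0 (r.2.1 - 1)) (min (l.length : Int) r.2.2.1)
    (le_max_left _ _) (min_le_left _ _)

lemma foldl_regions_eq (mask_type : String) (rs : List (String × Int × Int × String)) :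
    ∀ l : List Char, rs.foldl (maskA_region mask_type) l = rs.foldl (maskB_region mask_type) l := by
  induction rs with
  | nil => intro l; rfl
  | cons r rs ih =>
    intro l
    simp only [List.foldl_cons, region_eq, ih]

-- ===== VERDICT (by name: the statement is the Claim_ definition above) =====
theorem mask_sequence_spec : Claim_equal_mask_sequence := by
  intro seq regions mask_type _
  unfold Spec_mask_sequence mask_sequence mask_sequence_alt
  rw [foldl_regions_eq]
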